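-- pv_equiv track=rewrite | github.com/CraigBuckmaster/ScriptureDeepDive | _tools/quality_scorer.py | _format_verse_ranges
-- ===== SOURCE A (Python) =====
-- def _format_verse_ranges(verses):
--     """Format a list of verse numbers into compact ranges.
--
--     e.g. [1, 2, 3, 7, 8, 12] -> "1-3, 7-8, 12"
--     """
--     if not verses:
--         return ""
--     ranges = []
--     start = verses[0]
--     end = start
--     for v in verses[1:]:
--         if v == end + 1:
--             end = v
--         else:
--             ranges.append(f"{start}-{end}" if end > start else str(start))
--             start = end = v
--     ranges.append(f"{start}-{end}" if end > start else str(start))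
--     return ", ".join(ranges)
-- ===== SOURCE B (Python) =====
-- def _format_verse_ranges(verses):
--     runs = []  # (first, last) pairs, built back-to-front over reversed(verses)
--     for v in reversed(verses):
--         if runs and runs[-1][0] == v + 1:
--             runs[-1] = (v, runs[-1][1])
--         else:
--             runs.append((v, v))
--     runs.reverse()
--     return ", ".join(f"{a}-{b}" if b > a else str(a) for (a, b) in runs)
-- ===== Notes on version B (the rewrite author's own statement) =====
-- stated objective: alternative
-- what changed: Replaces A's fused stateful forward loop with a two-phase decomposition built back-to-front: a reversed traversal collects (first,last) run pairs, then each pair is formatted and the parts joined.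
import Mathlib
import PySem

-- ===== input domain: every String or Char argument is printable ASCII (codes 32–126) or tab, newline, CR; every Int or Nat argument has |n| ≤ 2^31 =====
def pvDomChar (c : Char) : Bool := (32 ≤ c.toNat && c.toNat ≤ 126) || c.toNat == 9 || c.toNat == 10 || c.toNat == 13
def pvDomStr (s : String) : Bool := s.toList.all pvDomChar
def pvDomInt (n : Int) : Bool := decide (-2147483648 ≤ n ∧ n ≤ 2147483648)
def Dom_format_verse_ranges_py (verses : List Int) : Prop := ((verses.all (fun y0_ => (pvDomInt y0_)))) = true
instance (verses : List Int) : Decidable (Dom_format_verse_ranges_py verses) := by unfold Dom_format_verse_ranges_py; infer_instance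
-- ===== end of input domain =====

-- B replaces A's fused stateful forward loop with a two-phase decomposition: a reversed
-- traversal builds the (first, last) run pairs back-to-front, then each pair is formatted
-- and the parts joined; objective: alternative.

-- f"{start}-{end}" if end > start else str(start)  (shared f-string expression of both Pythons)
def pvFmt2 (a b : Int) : String :=
  if b > a then PySem.Int.toStr a ++ "-" ++ PySem.Int.toStr b else PySem.Int.toStr a

-- ===== PORT A =====
def format_verse_ranges_py (verses : List Int) : String :=
  match verses with
  | [] => ""
  | v0 :: rest =>
    -- state (ranges, start, end), loop over verses[1:]
    let st := rest.foldl
      (fun (st : List String × Int × Int) v =>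
        let (ranges, start, e) := st
        if v = e + 1 then (ranges, start, v)
        else (ranges ++ [pvFmt2 start e], v, v))
      ([], v0, v0)
    let ranges := st.1 ++ [pvFmt2 st.2.1 st.2.2]
    PySem.Str.join ", " ranges

-- ===== PORT B =====
def format_verse_ranges_py_alt (verses : List Int) : String :=
  -- for v in reversed(verses): extend runs[-1] leftwards or append a fresh (v, v)
  let runs := verses.reverse.foldl
    (fun (runs : List (Int × Int)) v =>
      match runs.getLast? with
      | some (a, b) => if a = v + 1 then runs.dropLast ++ [(v, b)] else runs ++ [(v, v)]
      | none => runs ++ [(v, v)])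
    []
  -- runs.reverse(); then the comprehension + join
  PySem.Str.join ", " (runs.reverse.map (fun r => pvFmt2 r.1 r.2))

-- ===== PRECONDITION & SPEC =====
def Spec_format_verse_ranges_py (verses : List Int) (out : String) : Prop := out = format_verse_ranges_py_alt verses
instance (verses : List Int) (out : String) : Decidable (Spec_format_verse_ranges_py verses out) := by unfold Spec_format_verse_ranges_py; infer_instance

-- ===== CLAIM (what is proved, stated in full; the proofs are below) =====
def Claim_equal_format_verse_ranges_py : Prop := ∀ (verses : List Int), Dom_format_verse_ranges_py verses → Spec_format_verse_ranges_py verses (format_verse_ranges_py verses)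

-- ===== LEMMAS AND PROOFS =====

-- the run decomposition as (first, last) pairs, structurally (proof device)
def pvRunsP : List Int → List (Int × Int)
  | [] => []
  | v :: rest =>
    match pvRunsP rest with
    | (a, b) :: rs => if a = v + 1 then (v, b) :: rs else (v, v) :: (a, b) :: rs
    | [] => [(v, v)]

-- B's reversed loop computes the reversed run-pair list
theorem foldB_eq_runsP (l : List Int) :
    l.reverse.foldl
      (fun (runs : List (Int × Int)) v =>
        match runs.getLast? with
        | some (a, b) => if a = v + 1 then runs.dropLast ++ [(v, b)] else runs ++ [(v, v)]
        | none => runs ++ [(v, v)])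
      []
    = (pvRunsP l).reverse := by
  induction l with
  | nil => simp [pvRunsP]
  | cons v rest ih =>
    rw [List.reverse_cons, List.foldl_append, ih]
    simp only [List.foldl_cons, List.foldl_nil, pvRunsP]
    rcases h : pvRunsP rest with _ | ⟨⟨a, b⟩, rs⟩
    · simp
    · simp only [List.getLast?_reverse, List.head?_cons, List.dropLast_reverse, List.tail_cons]
      by_cases ha : a = v + 1 <;> simp [ha]

-- recursive rendering of A's loop (proof device)
def loopA : List Int → Int → Int → List String
  | [], start, e => [pvFmt2 start e]
  | v :: rest, start, e =>
    if v = e + 1 then loopA rest start v else pvFmt2 start e :: loopA rest v v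

theorem foldA_eq_loopA (rest : List Int) : ∀ (ranges : List String) (start e : Int),
    (rest.foldl
      (fun (st : List String × Int × Int) v =>
        let (ranges, start, e) := st
        if v = e + 1 then (ranges, start, v)
        else (ranges ++ [pvFmt2 start e], v, v))
      (ranges, start, e)).1
      ++ [pvFmt2 (rest.foldl
      (fun (st : List String × Int × Int) v =>
        let (ranges, start, e) := st
        if v = e + 1 then (ranges, start, v)
        else (ranges ++ [pvFmt2 start e], v, v))
      (ranges, start, e)).2.1 (rest.foldl
      (fun (st : List String × Int × Int) v =>
        let (ranges, start, e) := st
        if v = e + 1 then (ranges, start, v)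
        else (ranges ++ [pvFmt2 start e], v, v))
      (ranges, start, e)).2.2]
    = ranges ++ loopA rest start e := by
  induction rest with
  | nil => intro ranges start e; simp [loopA]
  | cons v rest ih =>
    intro ranges start e
    by_cases h : v = e + 1
    · simp [List.foldl, h, loopA, ih]
    · simp [List.foldl, h, loopA, ih, List.append_assoc]

-- key lemma: A's loop renders exactly the run pairs of its remaining input, with the
-- current run (start..e) possibly absorbing the first run of rest
theorem loopA_eq_runsP (rest : List Int) : ∀ (start e : Int),
    loopA rest start e =
      match pvRunsP rest with
      | (a, b) :: rs =>
        if a = e + 1 then pvFmt2 start b :: rs.map (fun r => pvFmt2 r.1 r.2)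
        else pvFmt2 start e :: ((a, b) :: rs).map (fun r => pvFmt2 r.1 r.2)
      | [] => [pvFmt2 start e] := by
  induction rest with
  | nil => intro start e; simp [loopA, pvRunsP]
  | cons v rest ih =>
    intro start e
    simp only [loopA, pvRunsP]
    rcases hr : pvRunsP rest with _ | ⟨⟨a, b⟩, rs⟩
    · by_cases h : v = e + 1 <;> simp [h, ih, hr]
    · by_cases ha : a = v + 1
      · subst ha
        by_cases h : v = e + 1
        · subst h; simp [ih, hr]
        · simp [h, ih, hr]
      · by_cases h : v = e + 1
        · subst h; simp [ha, ih, hr]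
        · simp [h, ha, ih, hr]

theorem loopA_eq_map_runsP (rest : List Int) (v : Int) :
    loopA rest v v = (pvRunsP (v :: rest)).map (fun r => pvFmt2 r.1 r.2) := by
  rw [loopA_eq_runsP]
  simp only [pvRunsP]
  rcases hr : pvRunsP rest with _ | ⟨⟨a, b⟩, rs⟩
  · simp
  · by_cases ha : a = v + 1 <;> simp [ha]

-- ===== VERDICT (by name: the statement is the Claim_ definition above) =====
theorem format_verse_ranges_py_spec : Claim_equal_format_verse_ranges_py := by
  intro verses _
  unfold Spec_format_verse_ranges_py format_verse_ranges_py format_verse_ranges_py_alt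
  rw [foldB_eq_runsP]
  simp only [List.reverse_reverse]
  match verses with
  | [] => simp [pvRunsP, PySem.Str.join]
  | v0 :: rest =>
    simp only []
    rw [foldA_eq_loopA rest [] v0 v0, loopA_eq_map_runsP]
    simp
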